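-- pv_equiv track=rewrite | github.com/IKiselgoff/MindboxTask1 | main.py | max_sum_with_bounds
-- ===== SOURCE A (Python) =====
-- def max_sum(num, n_digits):
--     if n_digits == 1:
--         return num
--
--     first_d = num // (10 ** (n_digits - 1))
--     first = first_d - 1 + 9 * (n_digits - 1)
--     second = first_d + max_sum(num - first_d * 10 ** (n_digits - 1), n_digits - 1)
--     if first > second:
--         return first
--     else:
--         return second
--
-- def max_sum_with_bounds(num1, num2, n_digits1, n_digits2):
--     if n_digits2 == 1:
--         return num2
--
--     first_d2 = num2 // (10 ** (n_digits2 - 1))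
--     first_d1 = num1 // (10 ** (n_digits1 - 1))
--
--     if n_digits2 > n_digits1 or first_d2 > first_d1:
--         first = first_d2 - 1 + 9 * (n_digits2 - 1)
--         second = first_d2 + max_sum(num2 - first_d2 * 10 ** (n_digits2 - 1), n_digits2 - 1)
--         if first > second:
--             return first
--         else:
--             return second
--
--     elif first_d2 == first_d1:
--         return first_d2 + max_sum_with_bounds(num1 - first_d1 * 10 ** (n_digits1 - 1),num2 - first_d2 * 10 ** (n_digits2 - 1),n_digits1 - 1, n_digits2 - 1)
-- ===== SOURCE B (Python) =====
-- def _digits(num, n_digits):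
--     # num as A's walk sees it: n_digits-1 low base-10 digits (floor semantics)
--     # below the leading quotient num // 10**(n_digits-1), most significant first.
--     ds = []
--     for _ in range(n_digits - 1):
--         num, r = divmod(num, 10)
--         ds.append(r)
--     ds.append(num)
--     ds.reverse()
--     return ds
--
-- def _max_sum_digits(ds):
--     # best of: the full digit sum, or at some position decrement the digit there
--     # and fill every remaining position with 9s.
--     total = sum(ds)
--     best = total
--     prefix = 0
--     rem = len(ds) - 1
--     for d in ds[:-1]:
--         cand = prefix + d - 1 + 9 * rem
--         if cand > best:
--             best = cand
--         prefix += d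
--         rem -= 1
--     return best
--
-- def max_sum(num, n_digits):
--     return _max_sum_digits(_digits(num, n_digits))
--
-- def max_sum_with_bounds(num1, num2, n_digits1, n_digits2):
--     if n_digits2 == 1:
--         return num2
--     if n_digits2 > n_digits1:
--         return max_sum(num2, n_digits2)
--     ds2 = _digits(num2, n_digits2)
--     ds1 = _digits(num1 // 10 ** (n_digits1 - n_digits2), n_digits2)
--     s = 0
--     for i, (d2, d1) in enumerate(zip(ds2, ds1)):
--         if i == n_digits2 - 1:
--             return s + d2
--         if d2 > d1:
--             return s + _max_sum_digits(ds2[i:])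
--         if d2 < d1:
--             return None
--         s += d2
-- ===== Notes on version B (the rewrite author's own statement) =====
-- stated objective: faster
-- what changed: B replaces A's power-per-level recursions by a digit-list algorithm: it extracts the n_digits-digit view of each number once by repeated divmod by 10 (plus one quotient for the leading position), then answers with single linear scans (a prefix-sum/best-candidate scan for max_sum, a lockstep digit comparison for the bounds walk), avoiding A's recomputation of 10**(n-1) at every recursion level.
-- outside the precondition, e.g. on max_sum_with_bounds(21, 12, 2, 2): A returns None, B returns None; on max_sum_with_bounds(-30, -30, 4, 3): A raises TypeError, B returns None
import Mathlib
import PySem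

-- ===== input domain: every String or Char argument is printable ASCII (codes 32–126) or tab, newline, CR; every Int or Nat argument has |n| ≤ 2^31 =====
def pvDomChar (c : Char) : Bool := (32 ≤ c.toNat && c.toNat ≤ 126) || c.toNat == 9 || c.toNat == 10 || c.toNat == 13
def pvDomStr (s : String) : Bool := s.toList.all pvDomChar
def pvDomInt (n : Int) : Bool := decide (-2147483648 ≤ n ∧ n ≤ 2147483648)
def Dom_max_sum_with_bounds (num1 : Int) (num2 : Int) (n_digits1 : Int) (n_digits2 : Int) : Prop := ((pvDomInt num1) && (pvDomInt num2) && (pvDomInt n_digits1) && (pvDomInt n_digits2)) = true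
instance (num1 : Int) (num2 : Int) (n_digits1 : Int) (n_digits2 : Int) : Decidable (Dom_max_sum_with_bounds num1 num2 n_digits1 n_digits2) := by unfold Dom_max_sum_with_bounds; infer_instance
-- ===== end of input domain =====

-- B replaces A's power-per-level recursions by a one-pass digit-list algorithm (no 10**(n-1)
-- recomputation at every level); equivalence of the RETURN value is proved on Pre_.

-- ===== PORT A =====
-- A's helper max_sum, literal recursive port. '(10:Int) ^ (…).toNat' is Python's
-- '10 ** (n_digits - 1)' exactly when n_digits ≥ 1; for n_digits < 1 Python computes float
-- powers and the recursion never returns (RecursionError) — outside Pre_; the 'n_digits < 1'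
-- guard only makes the Lean recursion total there.
def max_sum (num : Int) (n_digits : Int) : Int :=
  if n_digits = 1 then num
  else if n_digits < 1 then 0
  else
    let first_d := PySem.Int.floordiv num ((10 : Int) ^ (n_digits - 1).toNat)
    let first := first_d - 1 + 9 * (n_digits - 1)
    let second := first_d + max_sum (num - first_d * (10 : Int) ^ (n_digits - 1).toNat) (n_digits - 1)
    if first > second then first else second
termination_by n_digits.toNat
decreasing_by omega

def max_sum_with_bounds (num1 : Int) (num2 : Int) (n_digits1 : Int) (n_digits2 : Int) : Int :=
  if n_digits2 = 1 then num2
  else if n_digits2 < 1 then 0  -- Python: float powers, the recursion never returns (outside Pre_)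
  else
    let first_d2 := PySem.Int.floordiv num2 ((10 : Int) ^ (n_digits2 - 1).toNat)
    -- first_d1 is exact for n_digits1 ≥ 1; for n_digits1 < 1 Python gets a float here, but then
    -- 'n_digits2 > n_digits1' short-circuits and first_d1 is never consulted (Pre_ admits only those)
    let first_d1 := PySem.Int.floordiv num1 ((10 : Int) ^ (n_digits1 - 1).toNat)
    if n_digits2 > n_digits1 ∨ first_d2 > first_d1 then
      let first := first_d2 - 1 + 9 * (n_digits2 - 1)
      let second := first_d2 + max_sum (num2 - first_d2 * (10 : Int) ^ (n_digits2 - 1).toNat) (n_digits2 - 1)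
      if first > second then first else second
    else if first_d2 = first_d1 then
      first_d2 + max_sum_with_bounds (num1 - first_d1 * (10 : Int) ^ (n_digits1 - 1).toNat)
        (num2 - first_d2 * (10 : Int) ^ (n_digits2 - 1).toNat) (n_digits1 - 1) (n_digits2 - 1)
    else 0  -- Python falls off the function and returns None here (outside Pre_)
termination_by n_digits2.toNat
decreasing_by omega

-- ===== PORT B =====
-- B's _digits loop: Python appends the low digits then reverses once at the end; the port
-- accumulates by cons, which is exactly that reversed list (tail recursion, same divmods).
def pv_digits_loop (num : Int) (cnt : Nat) (acc : List Int) : Int × List Int :=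
  match cnt with
  | 0 => (num, acc)
  | c + 1 => pv_digits_loop (PySem.Int.floordiv num 10) c (PySem.Int.mod num 10 :: acc)

def pv_digits (num : Int) (n_digits : Int) : List Int :=
  let r := pv_digits_loop num (n_digits - 1).toNat []
  r.1 :: r.2

-- B's _max_sum_digits loop over ds[:-1] with state (prefix, rem, best)
def pv_msd_fold : List Int → Int → Int → Int → Int
  | [], _, _, best => best
  | d :: t, pre, rem, best =>
      pv_msd_fold t (pre + d) (rem - 1)
        (if pre + d - 1 + 9 * rem > best then pre + d - 1 + 9 * rem else best)

def pv_msd (ds : List Int) : Int :=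
  pv_msd_fold ds.dropLast 0 ((ds.length : Int) - 1) ds.sum

def max_sum_alt (num : Int) (n_digits : Int) : Int :=
  pv_msd (pv_digits num n_digits)

-- B's enumerate(zip(ds2, ds1)) loop; the current suffix of ds2 is Python's ds2[i:]
def pv_wgo : List Int → List Int → Int → Int → Int → Int
  | d2 :: t2, d1 :: t1, i, n2, s =>
      if i = n2 - 1 then s + d2
      else if d2 > d1 then s + pv_msd (d2 :: t2)
      else if d2 < d1 then 0  -- Python B returns None here (outside Pre_)
      else pv_wgo t2 t1 (i + 1) n2 (s + d2)
  | _, _, _, _, _ => 0  -- zip exhausted: Python falls off and returns None (outside Pre_)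

def max_sum_with_bounds_alt (num1 : Int) (num2 : Int) (n_digits1 : Int) (n_digits2 : Int) : Int :=
  if n_digits2 = 1 then num2
  else if n_digits2 > n_digits1 then max_sum_alt num2 n_digits2
  else
    pv_wgo (pv_digits num2 n_digits2)
      (pv_digits (PySem.Int.floordiv num1 ((10 : Int) ^ (n_digits1 - n_digits2).toNat)) n_digits2)
      0 n_digits2 0

-- ===== PRECONDITION & SPEC =====
-- num // 10**e, capped: for e ≥ 11 and the |x| ≤ 2^31 inputs Dom admits this is 0 (x ≥ 0)
-- or -1 (x < 0), so Pre_ stays cheap to decide for huge digit counts.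
def pvFd (x : Int) (e : Int) : Int :=
  if 11 ≤ e then (if 0 ≤ x then 0 else -1)
  else PySem.Int.floordiv x ((10 : Int) ^ e.toNat)

-- k-th most significant "digit" A's walk sees: index 0 is the whole leading quotient
-- num // 10^(m-1), index k ≥ 1 the single digit at weight 10^(m-1-k).
def pvDigB (x : Int) (m : Int) (k : Nat) : Int :=
  if k = 0 then pvFd x (m - 1) else (pvFd x (m - 1 - (k : Int))) % 10

-- Pre_ excludes exactly the inputs on which the Python A does not return an int:
--  * n_digits2 ≤ 0: float powers / RecursionError;
--  * n_digits1 ≤ -323 with n_digits1 < n_digits2: 10.0**(n_digits1-1) underflows to 0.0 and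
--    the (unused) first_d1 line raises ZeroDivisionError;
--  * n_digits2 ≤ n_digits1 with a leading-digit chain whose first divergence has the num1
--    digit above the num2 digit: A returns None (top level) or raises TypeError (int + None);
--  * in that tight n_digits2 ≤ n_digits1 case also n_digits2 > 900: A's mutual recursion there
--    is n_digits2 deep and CPython's default recursion limit (1000) raises RecursionError
--    (900 is a safe under-approximation).
def Pre_max_sum_with_bounds (num1 : Int) (num2 : Int) (n_digits1 : Int) (n_digits2 : Int) : Prop :=
  n_digits2 = 1 ∨ (2 ≤ n_digits2 ∧
    ((n_digits1 < n_digits2 ∧ -322 ≤ n_digits1) ∨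
     (n_digits2 ≤ n_digits1 ∧ n_digits2 ≤ 900 ∧
      ∀ k, k < (n_digits2 - 1).toNat →
        (∀ j, j < k → pvDigB num2 n_digits2 j = pvDigB num1 n_digits1 j) →
        pvDigB num1 n_digits1 k ≤ pvDigB num2 n_digits2 k)))
instance (num1 : Int) (num2 : Int) (n_digits1 : Int) (n_digits2 : Int) : Decidable (Pre_max_sum_with_bounds num1 num2 n_digits1 n_digits2) := by unfold Pre_max_sum_with_bounds; infer_instance

def pvWitness_max_sum_with_bounds : Int × Int × Int × Int := (27, 83, 2, 2)

def Spec_max_sum_with_bounds (num1 : Int) (num2 : Int) (n_digits1 : Int) (n_digits2 : Int) (out : Int) : Prop := out = max_sum_with_bounds_alt num1 num2 n_digits1 n_digits2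
instance (num1 : Int) (num2 : Int) (n_digits1 : Int) (n_digits2 : Int) (out : Int) : Decidable (Spec_max_sum_with_bounds num1 num2 n_digits1 n_digits2 out) := by unfold Spec_max_sum_with_bounds; infer_instance

-- ===== CLAIM (what is proved, stated in full; the proofs are below) =====
def Claim_equal_max_sum_with_bounds : Prop := ∀ (num1 : Int) (num2 : Int) (n_digits1 : Int) (n_digits2 : Int), Dom_max_sum_with_bounds num1 num2 n_digits1 n_digits2 → Pre_max_sum_with_bounds num1 num2 n_digits1 n_digits2 → Spec_max_sum_with_bounds num1 num2 n_digits1 n_digits2 (max_sum_with_bounds num1 num2 n_digits1 n_digits2)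

-- ===== LEMMAS AND PROOFS =====

-- exact (uncapped) version of pvDigB, used only in the proofs
def pvDig (x : Int) (m : Int) (k : Nat) : Int :=
  if k = 0 then PySem.Int.floordiv x ((10 : Int) ^ (m - 1).toNat)
  else (PySem.Int.floordiv x ((10 : Int) ^ (m - 1 - (k : Int)).toNat)) % 10

-- the exact chain condition Pre_'s capped one coincides with on Dom
def pvChain (num1 num2 n1 n2 : Int) : Prop :=
  ∀ k, k < (n2 - 1).toNat →
    (∀ j, j < k → pvDig num2 n2 j = pvDig num1 n1 j) →
    pvDig num1 n1 k ≤ pvDig num2 n2 k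

lemma pvDig0 (x m : Int) : pvDig x m 0 = PySem.Int.floordiv x ((10 : Int) ^ (m - 1).toNat) := rfl

lemma pv_pow_pos (a : Nat) : (0 : Int) < 10 ^ a := by positivity

-- (x % 10^(a+j)) / 10^a = (x / 10^a) % 10^j
lemma pv_emod_pow_ediv (x : Int) (a j : Nat) :
    (x % (10 : Int) ^ (a + j)) / 10 ^ a = (x / 10 ^ a) % 10 ^ j := by
  have hb : (0 : Int) < 10 ^ a := by positivity
  have hpow : (10 : Int) ^ (a + j) = 10 ^ a * 10 ^ j := pow_add 10 a j
  have hdd : x / (10 ^ a * 10 ^ j) = x / 10 ^ a / 10 ^ j :=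
    (Int.ediv_ediv_of_nonneg (le_of_lt hb)).symm
  rw [hpow, Int.emod_def, hdd]
  have h1 : x - 10 ^ a * 10 ^ j * (x / 10 ^ a / 10 ^ j)
      = x + (-(10 ^ j * (x / 10 ^ a / 10 ^ j))) * 10 ^ a := by ring
  rw [h1, Int.add_mul_ediv_right _ _ (ne_of_gt hb), Int.emod_def]
  ring

-- x - (x // p) * p = x % p  for p > 0
lemma pv_sub_fd_mul (x p : Int) (hp : 0 < p) :
    x - PySem.Int.floordiv x p * p = x % p := by
  rw [PySem.Int.floordiv_eq_ediv_of_pos hp, Int.emod_def]; ring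

-- the capped quotient agrees with the exact one on Dom-sized inputs
lemma pvFd_eq (x e : Int) (hx : -2147483648 ≤ x ∧ x ≤ 2147483648) (_he : 0 ≤ e) :
    pvFd x e = PySem.Int.floordiv x ((10 : Int) ^ e.toNat) := by
  unfold pvFd
  by_cases h11 : 11 ≤ e
  · rw [if_pos h11, PySem.Int.floordiv_eq_ediv_of_pos (pv_pow_pos _)]
    have hbig : (10 : Int) ^ 11 ≤ 10 ^ e.toNat :=
      pow_le_pow_right₀ (by norm_num) (by omega)
    have hb : (2147483648 : Int) < 10 ^ e.toNat := by
      have : (2147483648 : Int) < 10 ^ 11 := by norm_num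
      omega
    by_cases hx0 : 0 ≤ x
    · rw [if_pos hx0, Int.ediv_eq_zero_of_lt hx0 (by omega)]
    · rw [if_neg hx0]
      have hsplit : x = (x + 10 ^ e.toNat) + (-1) * 10 ^ e.toNat := by ring
      rw [hsplit, Int.add_mul_ediv_right _ _ (ne_of_gt (pv_pow_pos _)),
          Int.ediv_eq_zero_of_lt (by omega) (by omega)]
      ring
  · rw [if_neg h11]

lemma pvDigB_eq_pvDig (x m : Int) (k : Nat)
    (hx : -2147483648 ≤ x ∧ x ≤ 2147483648) (hk : (k : Int) ≤ m - 1) :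
    pvDigB x m k = pvDig x m k := by
  cases k with
  | zero =>
      show pvFd x (m - 1) = PySem.Int.floordiv x ((10 : Int) ^ (m - 1).toNat)
      exact pvFd_eq x (m - 1) hx (by omega)
  | succ k' =>
      show (pvFd x (m - 1 - ((k' + 1 : Nat) : Int))) % 10
          = (PySem.Int.floordiv x ((10 : Int) ^ (m - 1 - ((k' + 1 : Nat) : Int)).toNat)) % 10
      rw [pvFd_eq x (m - 1 - ((k' + 1 : Nat) : Int)) hx (by push_cast; push_cast at hk; omega)]

-- stripping the leading digit shifts pvDig by one position
lemma pvDig_shift (x : Int) (m : Int) (k : Nat) (h2 : 2 ≤ m) (hk : (k : Int) ≤ m - 2) :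
    pvDig (x - PySem.Int.floordiv x ((10 : Int) ^ (m - 1).toNat) * (10 : Int) ^ (m - 1).toNat)
      (m - 1) k = pvDig x m (k + 1) := by
  rw [pv_sub_fd_mul x _ (pv_pow_pos _)]
  cases k with
  | zero =>
      show pvDig (x % 10 ^ (m - 1).toNat) (m - 1) 0 = pvDig x m 1
      have e2 : (m - 1 - ((1 : Nat) : Int)).toNat = (m - 1 - 1).toNat := by push_cast; omega
      simp only [pvDig, if_neg Nat.one_ne_zero, e2]
      rw [PySem.Int.floordiv_eq_ediv_of_pos (pv_pow_pos _),
          PySem.Int.floordiv_eq_ediv_of_pos (pv_pow_pos _)]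
      have e1 : (m - 1).toNat = (m - 1 - 1).toNat + 1 := by omega
      rw [e1, pv_emod_pow_ediv x ((m - 1 - 1).toNat) 1, pow_one]
      rw [if_pos trivial, PySem.Int.floordiv_eq_ediv_of_pos (pv_pow_pos _)]
  | succ k' =>
      have ha : (0 : Int) ≤ m - 3 - (k' : Int) := by omega
      simp only [pvDig, if_neg (Nat.succ_ne_zero _)]
      rw [PySem.Int.floordiv_eq_ediv_of_pos (pv_pow_pos _),
          PySem.Int.floordiv_eq_ediv_of_pos (pv_pow_pos _)]
      have e1 : (m - 1 - 1 - ((k' + 1 : Nat) : Int)).toNat = (m - 3 - (k' : Int)).toNat := by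
        push_cast; omega
      have e2 : (m - 1 - ((k' + 1 + 1 : Nat) : Int)).toNat = (m - 3 - (k' : Int)).toNat := by
        push_cast; omega
      have e3 : (m - 1).toNat = (m - 3 - (k' : Int)).toNat + (k' + 2) := by omega
      rw [e1, e2, e3, pv_emod_pow_ediv x _ (k' + 2)]
      exact Int.emod_emod_of_dvd _ (dvd_pow_self 10 (Nat.succ_ne_zero _))

-- i-th lowest digit of num (floor semantics)
def pvLowDig (num : Int) (i : Nat) : Int := (num / 10 ^ i) % 10

lemma pv_digits_loop_eq (c : Nat) : ∀ (num : Int) (acc : List Int),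
    pv_digits_loop num c acc =
      (num / 10 ^ c, ((List.range c).map (pvLowDig num)).reverse ++ acc) := by
  induction c with
  | zero => intro num acc; simp [pv_digits_loop]
  | succ c ih =>
      intro num acc
      rw [pv_digits_loop, PySem.Int.floordiv_eq_ediv_of_pos (by norm_num : (0:Int) < 10),
          PySem.Int.mod_eq_emod_of_pos (by norm_num : (0:Int) < 10), ih]
      have hfst : num / 10 / 10 ^ c = num / 10 ^ (c + 1) := by
        rw [Int.ediv_ediv_of_nonneg (by norm_num), ← pow_succ']
      have hmap : (List.range (c + 1)).map (pvLowDig num)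
          = pvLowDig num 0 :: (List.range c).map (pvLowDig (num / 10)) := by
        rw [List.range_succ_eq_map, List.map_cons, List.map_map]
        congr 1
        apply List.map_congr_left
        intro i _
        show pvLowDig num (i + 1) = pvLowDig (num / 10) i
        unfold pvLowDig
        rw [Int.ediv_ediv_of_nonneg (by norm_num), ← pow_succ']
      rw [hfst, hmap, List.reverse_cons, List.append_assoc]
      have h0 : pvLowDig num 0 = num % 10 := by unfold pvLowDig; simp
      rw [h0]
      rfl

lemma pv_digits_eq (num n : Int) :
    pv_digits num n
      = num / 10 ^ (n - 1).toNat :: ((List.range (n - 1).toNat).map (pvLowDig num)).reverse := by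
  unfold pv_digits
  rw [pv_digits_loop_eq]
  simp

lemma pv_digits_length (num n : Int) : (pv_digits num n).length = (n - 1).toNat + 1 := by
  rw [pv_digits_eq]; simp

-- peeling the leading digit of the digit list
lemma pv_digits_peel (num n : Int) (h2 : 2 ≤ n) :
    pv_digits num n = PySem.Int.floordiv num ((10 : Int) ^ (n - 1).toNat)
      :: pv_digits (num % 10 ^ (n - 1).toNat) (n - 1) := by
  have hc : (n - 1).toNat = (n - 2).toNat + 1 := by omega
  have hc2 : (n - 1 - 1).toNat = (n - 2).toNat := by omega
  rw [pv_digits_eq, pv_digits_eq, hc2,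
      PySem.Int.floordiv_eq_ediv_of_pos (pv_pow_pos _)]
  congr 1
  rw [hc, List.range_succ, List.map_append, List.reverse_append]
  simp only [List.map_cons, List.map_nil, List.reverse_cons, List.reverse_nil,
    List.nil_append, List.cons_append]
  congr 1
  · show pvLowDig num ((n - 2).toNat) = num % 10 ^ ((n - 2).toNat + 1) / 10 ^ (n - 2).toNat
    unfold pvLowDig
    rw [pv_emod_pow_ediv num ((n - 2).toNat) 1, pow_one]
  · congr 1
    apply List.map_congr_left
    intro i hi
    have hilt : i < (n - 2).toNat := List.mem_range.mp hi
    show pvLowDig num i = pvLowDig (num % 10 ^ ((n - 2).toNat + 1)) i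
    unfold pvLowDig
    have hsplit : (n - 2).toNat + 1 = i + ((n - 2).toNat + 1 - i) := by omega
    rw [hsplit, pv_emod_pow_ediv num i ((n - 2).toNat + 1 - i),
        Int.emod_emod_of_dvd _ (dvd_pow_self 10 (by omega))]

-- the full digit sum is a lower bound for A's max_sum
lemma pv_sum_le_max_sum (fuel : Nat) : ∀ (n : Int), n.toNat = fuel → 1 ≤ n → ∀ num : Int,
    (pv_digits num n).sum ≤ max_sum num n := by
  induction fuel with
  | zero => intro n hf h1; omega
  | succ f ih =>
      intro n hf h1 num
      by_cases hn : n = 1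
      · subst hn
        rw [pv_digits_eq, max_sum]
        simp
      · have h2 : 2 ≤ n := by omega
        rw [pv_digits_peel num n h2, max_sum]
        simp only [if_neg hn, if_neg (by omega : ¬ n < 1), List.sum_cons]
        rw [pv_sub_fd_mul num _ (pv_pow_pos _)]
        have := ih (n - 1) (by omega) (by omega) (num % 10 ^ (n - 1).toNat)
        split_ifs <;> omega

-- B's candidate fold against A's max_sum (best already dominates the running digit sum)
lemma pv_fold_eq (fuel : Nat) : ∀ (n : Int), n.toNat = fuel → 1 ≤ n →
    ∀ (num s best : Int), s + (pv_digits num n).sum ≤ best →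
    pv_msd_fold (pv_digits num n).dropLast s (n - 1) best
      = if s + max_sum num n > best then s + max_sum num n else best := by
  induction fuel with
  | zero => intro n hf h1; omega
  | succ f ih =>
      intro n hf h1 num s best hbest
      by_cases hn : n = 1
      · subst hn
        have hms : max_sum num 1 = num := by rw [max_sum]; norm_num
        have hds : pv_digits num 1 = [num] := by rw [pv_digits_eq]; norm_num
        rw [hds] at hbest ⊢
        rw [hms]
        show pv_msd_fold [] s (1 - 1) best = if s + num > best then s + num else best
        rw [pv_msd_fold]
        simp only [List.sum_cons, List.sum_nil] at hbest
        rw [if_neg (by omega)]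
      · have h2 : 2 ≤ n := by omega
        rw [pv_digits_peel num n h2] at hbest ⊢
        have hne : pv_digits (num % 10 ^ (n - 1).toNat) (n - 1) ≠ [] := by
          rw [pv_digits_eq]; simp
        rw [List.dropLast_cons_of_ne_nil hne, pv_msd_fold]
        simp only [List.sum_cons] at hbest
        have hbst : (s + PySem.Int.floordiv num ((10 : Int) ^ (n - 1).toNat))
            + (pv_digits (num % 10 ^ (n - 1).toNat) (n - 1)).sum
            ≤ (if s + PySem.Int.floordiv num ((10 : Int) ^ (n - 1).toNat) - 1 + 9 * (n - 1) > best
               then s + PySem.Int.floordiv num ((10 : Int) ^ (n - 1).toNat) - 1 + 9 * (n - 1)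
               else best) := by
          split_ifs <;> omega
        rw [ih (n - 1) (by omega) (by omega) _ _ _ hbst]
        conv_rhs => rw [max_sum]
        simp only [if_neg hn, if_neg (by omega : ¬ n < 1)]
        rw [pv_sub_fd_mul num _ (pv_pow_pos _)]
        split_ifs <;> omega

-- B's max_sum equals A's
lemma pv_msalt_eq (num n : Int) (h1 : 1 ≤ n) : pv_msd (pv_digits num n) = max_sum num n := by
  unfold pv_msd
  have hlen : ((pv_digits num n).length : Int) - 1 = n - 1 := by
    rw [pv_digits_length]; push_cast; omega
  rw [hlen, pv_fold_eq n.toNat n rfl h1 num 0 _ (by omega)]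
  have := pv_sum_le_max_sum n.toNat n rfl h1 num
  split_ifs <;> omega

-- the loop counter and bound of pv_wgo only matter through their difference
lemma pv_wgo_shift (l2 : List Int) : ∀ (l1 : List Int) (i n2 s : Int),
    pv_wgo l2 l1 (i + 1) (n2 + 1) s = pv_wgo l2 l1 i n2 s := by
  induction l2 with
  | nil => intro l1 i n2 s; cases l1 <;> rfl
  | cons d2 t2 ih =>
      intro l1 i n2 s
      cases l1 with
      | nil => rfl
      | cons d1 t1 =>
          rw [pv_wgo, pv_wgo]
          by_cases hi : i = n2 - 1
          · rw [if_pos (by omega), if_pos hi]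
          · rw [if_neg (by omega), if_neg hi]
            split_ifs <;> [rfl; rfl; exact ih t1 (i + 1) n2 (s + d2)]

-- main loop of B against A's recursion, in the tight case n2 ≤ n1
lemma pv_wmain (fuel : Nat) : ∀ (n2 : Int), n2.toNat = fuel →
    ∀ num1 num2 n1 s : Int, 2 ≤ n2 → n2 ≤ n1 → pvChain num1 num2 n1 n2 →
    pv_wgo (pv_digits num2 n2)
        (pv_digits (PySem.Int.floordiv num1 ((10 : Int) ^ (n1 - n2).toNat)) n2) 0 n2 s
      = s + max_sum_with_bounds num1 num2 n1 n2 := by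
  induction fuel with
  | zero => intro n2 hf num1 num2 n1 s h2; omega
  | succ f ih =>
    intro n2 hf num1 num2 n1 s h2 hle hch
    -- the head of num1's trimmed digit list is A's first_d1
    have hq1 : PySem.Int.floordiv (PySem.Int.floordiv num1 ((10 : Int) ^ (n1 - n2).toNat))
        ((10 : Int) ^ (n2 - 1).toNat) = PySem.Int.floordiv num1 ((10 : Int) ^ (n1 - 1).toNat) := by
      rw [PySem.Int.floordiv_eq_ediv_of_pos (pv_pow_pos _),
          PySem.Int.floordiv_eq_ediv_of_pos (pv_pow_pos _),
          PySem.Int.floordiv_eq_ediv_of_pos (pv_pow_pos _),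
          Int.ediv_ediv_of_nonneg (le_of_lt (pv_pow_pos _)), ← pow_add]
      congr 2
      omega
    rw [pv_digits_peel num2 n2 h2, pv_digits_peel _ n2 h2, hq1, pv_wgo]
    rw [if_neg (by omega : ¬ (0 : Int) = n2 - 1)]
    -- Pre_'s chain condition at k = 0: the leading quotients compare ≤
    have h0 := hch 0 (by omega) (fun j hj => absurd hj (Nat.not_lt_zero j))
    rw [pvDig0, pvDig0] at h0
    conv_rhs => rw [max_sum_with_bounds]
    rw [if_neg (by omega : ¬ n2 = 1), if_neg (by omega : ¬ n2 < 1)]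
    by_cases hgt : PySem.Int.floordiv num2 ((10 : Int) ^ (n2 - 1).toNat) >
        PySem.Int.floordiv num1 ((10 : Int) ^ (n1 - 1).toNat)
    · -- divergent digit: B takes max_sum of the whole remaining upper bound
      rw [if_pos hgt, if_pos (Or.inr hgt), ← pv_digits_peel num2 n2 h2,
          pv_msalt_eq num2 n2 (by omega)]
      conv_lhs => rw [max_sum]
      rw [if_neg (by omega : ¬ n2 = 1), if_neg (by omega : ¬ n2 < 1)]
    · rw [if_neg hgt]
      have heq : PySem.Int.floordiv num2 ((10 : Int) ^ (n2 - 1).toNat) =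
          PySem.Int.floordiv num1 ((10 : Int) ^ (n1 - 1).toNat) := by omega
      rw [if_neg (by omega : ¬ PySem.Int.floordiv num2 ((10 : Int) ^ (n2 - 1).toNat) <
            PySem.Int.floordiv num1 ((10 : Int) ^ (n1 - 1).toNat)),
          if_neg (by omega : ¬ (n2 > n1 ∨ PySem.Int.floordiv num2 ((10 : Int) ^ (n2 - 1).toNat) >
            PySem.Int.floordiv num1 ((10 : Int) ^ (n1 - 1).toNat))), if_pos heq]
      -- the trimmed tail of num1's digits is the digit list of the next A-call's first argument
      have ht1 : PySem.Int.floordiv num1 ((10 : Int) ^ (n1 - n2).toNat) % 10 ^ (n2 - 1).toNat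
          = PySem.Int.floordiv
              (num1 - PySem.Int.floordiv num1 ((10 : Int) ^ (n1 - 1).toNat) * (10 : Int) ^ (n1 - 1).toNat)
              ((10 : Int) ^ ((n1 - 1) - (n2 - 1)).toNat) := by
        rw [pv_sub_fd_mul num1 _ (pv_pow_pos _),
            PySem.Int.floordiv_eq_ediv_of_pos (pv_pow_pos _),
            PySem.Int.floordiv_eq_ediv_of_pos (pv_pow_pos _)]
        have he : ((n1 - 1) - (n2 - 1)).toNat = (n1 - n2).toNat := by omega
        have hsum : (n1 - 1).toNat = (n1 - n2).toNat + (n2 - 1).toNat := by omega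
        rw [he, hsum, pv_emod_pow_ediv num1 ((n1 - n2).toNat) ((n2 - 1).toNat)]
      have ht2 : num2 % 10 ^ (n2 - 1).toNat
          = num2 - PySem.Int.floordiv num2 ((10 : Int) ^ (n2 - 1).toNat) * (10 : Int) ^ (n2 - 1).toNat :=
        (pv_sub_fd_mul num2 _ (pv_pow_pos _)).symm
      by_cases hb : n2 - 1 = 1
      · -- next level is the base case: one digit left on the num2 side
        have hds : pv_digits (num2 % 10 ^ (n2 - 1).toNat) (n2 - 1) = [num2 % 10 ^ (n2 - 1).toNat] := by
          rw [pv_digits_eq, hb]; norm_num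
        rw [hds]
        have hds1ne : ∃ a t, pv_digits (PySem.Int.floordiv num1 ((10 : Int) ^ (n1 - n2).toNat) %
            10 ^ (n2 - 1).toNat) (n2 - 1) = a :: t := by
          rw [pv_digits_eq]; exact ⟨_, _, rfl⟩
        obtain ⟨a, t, hat⟩ := hds1ne
        rw [hat, pv_wgo, if_pos (by omega : (0 : Int) + 1 = n2 - 1)]
        conv_rhs => rw [max_sum_with_bounds]
        rw [if_pos hb, ← ht2]
        ring
      · -- inner step: shift the counter and apply the induction hypothesis one level down
        have hshift : pv_wgo (pv_digits (num2 % 10 ^ (n2 - 1).toNat) (n2 - 1))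
            (pv_digits (PySem.Int.floordiv num1 ((10 : Int) ^ (n1 - n2).toNat) %
              10 ^ (n2 - 1).toNat) (n2 - 1)) (0 + 1) n2
            (s + PySem.Int.floordiv num2 ((10 : Int) ^ (n2 - 1).toNat))
            = pv_wgo (pv_digits (num2 % 10 ^ (n2 - 1).toNat) (n2 - 1))
            (pv_digits (PySem.Int.floordiv num1 ((10 : Int) ^ (n1 - n2).toNat) %
              10 ^ (n2 - 1).toNat) (n2 - 1)) 0 (n2 - 1)
            (s + PySem.Int.floordiv num2 ((10 : Int) ^ (n2 - 1).toNat)) := by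
          have hn2 : n2 = (n2 - 1) + 1 := by ring
          rw [hn2]
          rw [show (n2 - 1) + 1 - 1 = n2 - 1 by ring] at *
          exact pv_wgo_shift _ _ 0 (n2 - 1) _
        rw [hshift, ht1, ht2]
        -- shifted chain condition for the induction hypothesis
        have hch' : pvChain
            (num1 - PySem.Int.floordiv num1 ((10 : Int) ^ (n1 - 1).toNat) * (10 : Int) ^ (n1 - 1).toNat)
            (num2 - PySem.Int.floordiv num2 ((10 : Int) ^ (n2 - 1).toNat) * (10 : Int) ^ (n2 - 1).toNat)
            (n1 - 1) (n2 - 1) := by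
          intro k hk hhyp
          have hk3 : (k : Int) ≤ n2 - 3 := by omega
          rw [pvDig_shift num1 n1 k (by omega) (by omega),
              pvDig_shift num2 n2 k (by omega) (by omega)]
          refine hch (k + 1) (by omega) ?_
          intro j hj
          cases j with
          | zero => rw [pvDig0, pvDig0]; exact heq
          | succ j' =>
            have hs := hhyp j' (by omega)
            rwa [pvDig_shift num1 n1 j' (by omega) (by omega),
                 pvDig_shift num2 n2 j' (by omega) (by omega)] at hs
        rw [ih (n2 - 1) (by omega) _ _ (n1 - 1) _ (by omega) (by omega) hch']
        ring

-- ===== VERDICT (by name: the statement is the Claim_ definition above) =====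
theorem max_sum_with_bounds_spec : Claim_equal_max_sum_with_bounds := by
  intro num1 num2 n1 n2 hdom hpre
  unfold Spec_max_sum_with_bounds
  unfold Dom_max_sum_with_bounds pvDomInt at hdom
  simp only [Bool.and_eq_true, decide_eq_true_eq] at hdom
  have hx1 : -2147483648 ≤ num1 ∧ num1 ≤ 2147483648 := hdom.1.1.1
  have hx2 : -2147483648 ≤ num2 ∧ num2 ≤ 2147483648 := hdom.1.1.2
  rcases hpre with h1 | ⟨h2, hcase⟩
  · rw [max_sum_with_bounds, max_sum_with_bounds_alt, if_pos h1, if_pos h1]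
  · rcases hcase with ⟨hlt, hlo⟩ | ⟨hle, h900, hchB⟩
    · -- n1 < n2: both sides are max_sum of the upper bound
      rw [max_sum_with_bounds, max_sum_with_bounds_alt,
          if_neg (by omega : ¬ n2 = 1), if_neg (by omega : ¬ n2 = 1),
          if_neg (by omega : ¬ n2 < 1),
          if_pos (Or.inl (by omega : n2 > n1)), if_pos (by omega : n2 > n1)]
      unfold max_sum_alt
      rw [pv_msalt_eq num2 n2 (by omega)]
      conv_rhs => rw [max_sum]
      rw [if_neg (by omega : ¬ n2 = 1), if_neg (by omega : ¬ n2 < 1)]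
    · -- tight case: capped chain condition transfers to the exact one on Dom
      have hch : pvChain num1 num2 n1 n2 := by
        intro k hk hhyp
        rw [← pvDigB_eq_pvDig num1 n1 k hx1 (by omega),
            ← pvDigB_eq_pvDig num2 n2 k hx2 (by omega)]
        apply hchB k hk
        intro j hj
        rw [pvDigB_eq_pvDig num1 n1 j hx1 (by omega),
            pvDigB_eq_pvDig num2 n2 j hx2 (by omega)]
        exact hhyp j hj
      have hmain := pv_wmain n2.toNat n2 rfl num1 num2 n1 0 h2 hle hch
      rw [max_sum_with_bounds_alt, if_neg (by omega : ¬ n2 = 1),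
          if_neg (by omega : ¬ n2 > n1)]
      omega
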